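-- pv_equiv track=rewrite | github.com/Magui-alves009/eda | actual opti dunno.py | find_dimension
-- ===== SOURCE A (Python) =====
-- def find_dimension(instructions):
--     """
--     find_dimension  takes as input the dictionary previously created by read_entry.
--     It returns:
--         - width and height of the labirinth;
--         - start_point and end_point of the labirinth
--     """
--
--     coordinates = {'U': (0, -1), 'D': (0, 1), 'R': (1, 0), 'L': (-1, 0)}  # this dictionary is the correspondence
--                                                                           # between the directions present in the file and
--                                                                           # coordinates that each robot does in the maze
--     # Initialize the limits of the maze:
--     min_x, max_x = 0, 0
--     min_y, max_y = 0, 0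
--
--     # For each robot, we will substitute his directions to the steps in the maze (accordingly to coordinates):
--     for robot, directions in instructions.items():
--         x, y = 0, 0
--         for direction in directions:
--             if direction in coordinates:
--                 nx, ny = coordinates[direction]  # we will atualize x and y accordingly to the commands:
--                 x += nx
--                 y += ny
--                 # Atualize the limits of the maze
--                 max_x = max(max_x, x)
--                 max_y = max(max_y, y)
--                 min_x = min(min_x, x)
--                 min_y = min(min_y, y)
--
--     # Calculation of the width and height of the maze:
--     width = max_x - min_x + 1  # width will be the difference between the maximum and the minimum of x
--     height = max_y - min_y + 1  # height will be the difference between the maximum and the minimum of y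
--
--     # Calculation of the start and the end of the maze:
--     start_point = [abs(min_x), abs(min_y)]  # the start point will be the one with the less value of x and the less value of y
--     end_point = [abs(max_x), abs(max_y)]  # the end point will be the one with the bigger value of x and the bigger value of y
--     # Output variables:
--     return width, height, start_point, end_point
-- ===== SOURCE B (Python) =====
-- def find_dimension(instructions):
--     """Different algorithm: each robot's path extremes are computed back-to-front
--     as *relative* extremes of suffixes (no absolute position is ever tracked):
--     for a suffix, keep (displacement, lowest point, highest point) relative to the
--     suffix's start; prepending a step (sx, sy) shifts these and clamps with the
--     origin.  Per-robot extremes are then merged into the global bounding box."""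
--     deltas = {'U': (0, -1), 'D': (0, 1), 'R': (1, 0), 'L': (-1, 0)}
--     lox = hix = loy = hiy = 0
--     for directions in instructions.values():
--         dx = lx = hx = 0
--         dy = ly = hy = 0
--         for d in reversed(directions):
--             if d in deltas:
--                 sx, sy = deltas[d]
--                 dx, lx, hx = sx + dx, min(0, sx + lx), max(0, sx + hx)
--                 dy, ly, hy = sy + dy, min(0, sy + ly), max(0, sy + hy)
--         lox, hix = min(lox, lx), max(hix, hx)
--         loy, hiy = min(loy, ly), max(hiy, hy)
--     return hix - lox + 1, hiy - loy + 1, [abs(lox), abs(loy)], [abs(hix), abs(hiy)]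
-- ===== Notes on version B (the rewrite author's own statement) =====
-- stated objective: alternative
-- what changed: Instead of simulating absolute positions forward and updating running global extremes, B traverses each robot's directions in reverse, maintaining (displacement, low, high) of the suffix relative to its own start point - a segment-combination recurrence with no position variable - and merges per-robot relative extremes into the bounding box afterwards.
import Mathlib
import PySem

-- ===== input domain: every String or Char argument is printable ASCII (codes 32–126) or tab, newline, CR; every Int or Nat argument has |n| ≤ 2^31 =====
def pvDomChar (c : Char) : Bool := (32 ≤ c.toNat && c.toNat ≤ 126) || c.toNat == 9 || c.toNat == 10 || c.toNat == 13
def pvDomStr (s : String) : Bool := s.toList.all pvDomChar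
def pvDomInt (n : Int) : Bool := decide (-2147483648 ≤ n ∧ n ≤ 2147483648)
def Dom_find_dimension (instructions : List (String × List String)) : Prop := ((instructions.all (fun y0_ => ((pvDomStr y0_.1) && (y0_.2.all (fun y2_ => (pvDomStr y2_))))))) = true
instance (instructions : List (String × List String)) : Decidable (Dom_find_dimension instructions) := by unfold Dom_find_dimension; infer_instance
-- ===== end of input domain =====

-- B computes each robot's extremes back-to-front as relative suffix extremes (no absolute position), merging per-robot results afterwards (alternative, same cost).


-- ===== PORT A =====
-- the 'coordinates' dict of A
def pvDirsA : PySem.Dict String (Int × Int) :=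
  PySem.Dict.ofList [("U", (0, -1)), ("D", (0, 1)), ("R", (1, 0)), ("L", (-1, 0))]

-- A's inner-loop body: state (x, y, min_x, max_x, min_y, max_y)
def pvStepA (s : Int × Int × Int × Int × Int × Int) (d : String) : Int × Int × Int × Int × Int × Int :=
  match pvDirsA.get? d with
  | none => s
  | some (nx, ny) =>
      let x := s.1 + nx
      let y := s.2.1 + ny
      (x, y, min s.2.2.1 x, max s.2.2.2.1 x, min s.2.2.2.2.1 y, max s.2.2.2.2.2 y)

-- A's outer-loop body over one robot: lims = (min_x, max_x, min_y, max_y)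
def pvRobotA (lims : Int × Int × Int × Int) (rb : String × List String) : Int × Int × Int × Int :=
  (rb.2.foldl pvStepA (0, 0, lims)).2.2

def find_dimension (instructions : List (String × List String)) : Int × Int × List Int × List Int :=
  -- the dict parameter: duplicate keys overwrite in place (Python dict semantics)
  let items := (PySem.Dict.ofList instructions).items
  let lims := items.foldl pvRobotA (0, 0, 0, 0)
  (lims.2.1 - lims.1 + 1, lims.2.2.2 - lims.2.2.1 + 1, [|lims.1|, |lims.2.2.1|], [|lims.2.1|, |lims.2.2.2|])

-- ===== PORT B =====
-- the 'deltas' dict of B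
def pvDirsB : PySem.Dict String (Int × Int) :=
  PySem.Dict.ofList [("U", (0, -1)), ("D", (0, 1)), ("R", (1, 0)), ("L", (-1, 0))]

-- relative extremes of a path suffix: displacement / low / high per axis
structure PvExt where
  dx : Int
  lx : Int
  hx : Int
  dy : Int
  ly : Int
  hy : Int
deriving DecidableEq, Repr

-- B's inner-loop body (runs over reversed directions): prepend one step to the suffix
def pvStepB (s : PvExt) (d : String) : PvExt :=
  match pvDirsB.get? d with
  | none => s
  | some (sx, sy) =>
      { dx := sx + s.dx, lx := min 0 (sx + s.lx), hx := max 0 (sx + s.hx),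
        dy := sy + s.dy, ly := min 0 (sy + s.ly), hy := max 0 (sy + s.hy) }

-- B's outer-loop body: merge one robot's relative extremes into the box (lox, hix, loy, hiy)
def pvRobotB (acc : Int × Int × Int × Int) (rb : String × List String) : Int × Int × Int × Int :=
  let e := rb.2.reverse.foldl pvStepB ⟨0, 0, 0, 0, 0, 0⟩
  (min acc.1 e.lx, max acc.2.1 e.hx, min acc.2.2.1 e.ly, max acc.2.2.2 e.hy)

def find_dimension_alt (instructions : List (String × List String)) : Int × Int × List Int × List Int :=
  let items := (PySem.Dict.ofList instructions).items
  let r := items.foldl pvRobotB (0, 0, 0, 0)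
  (r.2.1 - r.1 + 1, r.2.2.2 - r.2.2.1 + 1, [|r.1|, |r.2.2.1|], [|r.2.1|, |r.2.2.2|])

-- ===== PRECONDITION & SPEC =====
def Spec_find_dimension (instructions : List (String × List String)) (out : Int × Int × List Int × List Int) : Prop := out = find_dimension_alt instructions
instance (instructions : List (String × List String)) (out : Int × Int × List Int × List Int) : Decidable (Spec_find_dimension instructions out) := by unfold Spec_find_dimension; infer_instance

-- ===== CLAIM (what is proved, stated in full; the proofs are below) =====
def Claim_equal_find_dimension : Prop := ∀ (instructions : List (String × List String)), Dom_find_dimension instructions → Spec_find_dimension instructions (find_dimension instructions)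

-- ===== LEMMAS AND PROOFS =====

-- the suffix extremes as a foldr (B's reverse-foldl in recursion-friendly form)
def pvExtOf (ds : List String) : PvExt :=
  ds.foldr (fun d s => pvStepB s d) ⟨0, 0, 0, 0, 0, 0⟩

lemma pvExtOf_eq (ds : List String) :
    ds.reverse.foldl pvStepB ⟨0, 0, 0, 0, 0, 0⟩ = pvExtOf ds := by
  simp [pvExtOf, List.foldl_reverse]

-- the relative extremes always bracket 0
lemma pvExt_inv (ds : List String) :
    (pvExtOf ds).lx ≤ 0 ∧ 0 ≤ (pvExtOf ds).hx ∧ (pvExtOf ds).ly ≤ 0 ∧ 0 ≤ (pvExtOf ds).hy := by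
  induction ds with
  | nil => simp [pvExtOf]
  | cons d t ih =>
    have h : pvExtOf (d :: t) = pvStepB (pvExtOf t) d := rfl
    rw [h]
    cases hg : pvDirsB.get? d with
    | none => simpa [pvStepB, hg] using ih
    | some p =>
      obtain ⟨sx, sy⟩ := p
      simp only [pvStepB, hg]
      constructor
      · exact min_le_left _ _
      refine ⟨le_max_left _ _, min_le_left _ _, le_max_left _ _⟩

-- key correspondence: A's forward simulation from (x, y) with bracketing extremes
-- equals the shifted relative suffix extremes
lemma stepA_eq (ds : List String) (x y mnx mxx mny mxy : Int)
    (h1 : mnx ≤ x) (h2 : x ≤ mxx) (h3 : mny ≤ y) (h4 : y ≤ mxy) :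
    ds.foldl pvStepA (x, y, mnx, mxx, mny, mxy) =
      (x + (pvExtOf ds).dx, y + (pvExtOf ds).dy,
       min mnx (x + (pvExtOf ds).lx), max mxx (x + (pvExtOf ds).hx),
       min mny (y + (pvExtOf ds).ly), max mxy (y + (pvExtOf ds).hy)) := by
  induction ds generalizing x y mnx mxx mny mxy with
  | nil =>
    simp only [List.foldl_nil, pvExtOf, List.foldr_nil]
    refine Prod.ext ?_ (Prod.ext ?_ (Prod.ext ?_ (Prod.ext ?_ (Prod.ext ?_ ?_)))) <;> simp <;> omega
  | cons d t ih =>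
    have hfold : pvExtOf (d :: t) = pvStepB (pvExtOf t) d := rfl
    simp only [List.foldl_cons]
    cases hg : pvDirsA.get? d with
    | none =>
      have hA : pvStepA (x, y, mnx, mxx, mny, mxy) d = (x, y, mnx, mxx, mny, mxy) := by
        simp [pvStepA, hg]
      have hB : pvStepB (pvExtOf t) d = pvExtOf t := by
        simp only [pvStepB]; rw [show pvDirsB = pvDirsA from rfl, hg]
      rw [hA, hfold, hB]
      exact ih x y mnx mxx mny mxy h1 h2 h3 h4
    | some p =>
      obtain ⟨sx, sy⟩ := p
      have hA : pvStepA (x, y, mnx, mxx, mny, mxy) d =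
          (x + sx, y + sy, min mnx (x + sx), max mxx (x + sx),
           min mny (y + sy), max mxy (y + sy)) := by
        simp [pvStepA, hg]
      have hB : pvStepB (pvExtOf t) d =
          ⟨sx + (pvExtOf t).dx, min 0 (sx + (pvExtOf t).lx), max 0 (sx + (pvExtOf t).hx),
           sy + (pvExtOf t).dy, min 0 (sy + (pvExtOf t).ly), max 0 (sy + (pvExtOf t).hy)⟩ := by
        simp only [pvStepB]; rw [show pvDirsB = pvDirsA from rfl, hg]
      rw [hA, ih (x + sx) (y + sy) _ _ _ _
            (min_le_right _ _) (le_max_right _ _) (min_le_right _ _) (le_max_right _ _),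
          hfold, hB]
      obtain ⟨i1, i2, i3, i4⟩ := pvExt_inv t
      refine Prod.ext ?_ (Prod.ext ?_ (Prod.ext ?_ (Prod.ext ?_ (Prod.ext ?_ ?_)))) <;> simp <;> omega
-- outer loops agree, given the box brackets the origin
lemma outer_eq (items : List (String × List String)) (lims : Int × Int × Int × Int)
    (h1 : lims.1 ≤ 0) (h2 : 0 ≤ lims.2.1) (h3 : lims.2.2.1 ≤ 0) (h4 : 0 ≤ lims.2.2.2) :
    items.foldl pvRobotA lims = items.foldl pvRobotB lims := by
  induction items generalizing lims with
  | nil => rfl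
  | cons rb t ih =>
    obtain ⟨mnx, mxx, mny, mxy⟩ := lims
    simp only [List.foldl_cons]
    have hA : pvRobotA (mnx, mxx, mny, mxy) rb = pvRobotB (mnx, mxx, mny, mxy) rb := by
      simp only [pvRobotA, pvRobotB, pvExtOf_eq,
        stepA_eq rb.2 0 0 mnx mxx mny mxy h1 h2 h3 h4]
      simp
    rw [hA]
    obtain ⟨i1, i2, i3, i4⟩ := pvExt_inv rb.2
    refine ih (pvRobotB (mnx, mxx, mny, mxy) rb) ?_ ?_ ?_ ?_ <;>
      simp only [pvRobotB, pvExtOf_eq] <;> simp <;> omega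

-- ===== VERDICT (by name: the statement is the Claim_ definition above) =====
theorem find_dimension_spec : Claim_equal_find_dimension := by
  intro instructions _
  unfold Spec_find_dimension find_dimension find_dimension_alt
  simp only
  rw [outer_eq _ (0, 0, 0, 0) le_rfl le_rfl le_rfl le_rfl]
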